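-- pv_equiv track=rewrite | github.com/JZU0/codingtest-practice | 프로그래머스/2/131127. 할인 행사/할인 행사.py | solution
-- ===== SOURCE A (Python) =====
-- def solution(want, number, discount):
--     arr = {}
--     temp = {}
--     for i in range(len(want)):
--         arr[want[i]] = number[i]
--     start = -1
--     end = 9
--     answer = 0
--
--     for i in range(10):
--         if discount[i] not in temp:
--             temp[discount[i]] = 1
--         else:
--             temp[discount[i]] += 1
--
--     while end < len(discount):
--         if(arr==temp):
--             answer += 1
--         start += 1
--         if discount[start] in temp:
--             temp[discount[start]] -= 1
--             if temp[discount[start]] == 0: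
--                 del temp[discount[start]]
--         end += 1
--         if end < len(discount):
--             if discount[end] not in temp:
--                 temp[discount[end]] = 1
--             else:
--                 temp[discount[end]] += 1
--     return answer
-- ===== SOURCE B (Python) =====
-- def solution(want, number, discount):
--     arr = dict(zip(want, number))
--     answer = 0
--     i = 0
--     while True:
--         cnt = {}
--         for j in range(i, i + 10):
--             item = discount[j]
--             cnt[item] = cnt.get(item, 0) + 1
--         if arr == cnt:
--             answer += 1
--         i += 1
--         if i + 10 > len(discount):
--             return answer
-- ===== Notes on version B (the rewrite author's own statement) =====
-- stated objective: alternative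
-- what changed: B replaces A's incrementally maintained sliding dict (decrement/delete/increment bookkeeping with start/end cursors) by building the target dict once from zip(want, number) and recounting every 10-day window from scratch into a fresh dict (do-while over window starts).
import Mathlib
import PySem

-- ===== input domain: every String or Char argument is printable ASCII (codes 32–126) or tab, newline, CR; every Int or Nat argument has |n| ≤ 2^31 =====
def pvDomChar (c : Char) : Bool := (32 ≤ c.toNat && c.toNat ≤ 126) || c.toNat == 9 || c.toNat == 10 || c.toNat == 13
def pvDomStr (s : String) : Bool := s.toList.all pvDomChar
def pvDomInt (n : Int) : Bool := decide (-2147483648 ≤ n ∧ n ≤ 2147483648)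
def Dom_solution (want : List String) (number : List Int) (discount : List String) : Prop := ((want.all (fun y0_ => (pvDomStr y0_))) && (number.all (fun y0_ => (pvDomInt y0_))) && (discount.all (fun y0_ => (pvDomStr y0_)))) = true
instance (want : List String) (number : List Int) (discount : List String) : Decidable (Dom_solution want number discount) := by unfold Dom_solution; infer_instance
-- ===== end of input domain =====

-- B builds the target dict once from zip(want, number) and recounts every 10-day
-- window from scratch into a fresh dict, instead of A's incrementally updated sliding
-- dict; objective: alternative (not faster).

-- Python's 'd1 == d2' on dicts: order-insensitive mapping equality (both ports use it).
def dictEqPy (a b : PySem.Dict String Int) : Bool :=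
  a.size == b.size && a.items.all (fun kv => b.get? kv.1 == some kv.2)

-- ===== PORT A =====
-- 'if x not in temp: temp[x] = 1 else: temp[x] += 1'
def addA (d : PySem.Dict String Int) (x : String) : PySem.Dict String Int :=
  match d.get? x with
  | none => d.insert x 1
  | some v => d.insert x (v + 1)

-- 'if x in temp: temp[x] -= 1; if temp[x] == 0: del temp[x]'
def popA (d : PySem.Dict String Int) (x : String) : PySem.Dict String Int :=
  match d.get? x with
  | none => d
  | some v =>
      let t1 := d.insert x (v - 1)
      if v - 1 == 0 then t1.erase x else t1

-- the 'while end < len(discount)' loop; fuel bounds the iterations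
def solLoopA (discount : List String) (arr : PySem.Dict String Int)
    (temp : PySem.Dict String Int) (start e answer : Int) : Nat → Int
  | 0 => answer
  | fuel + 1 =>
    if e < (discount.length : Int) then
      let answer' := if dictEqPy arr temp then answer + 1 else answer
      let start' := start + 1
      let temp' := popA temp (PySem.List.pyGetD discount start' "")
      let e' := e + 1
      let temp'' :=
        if e' < (discount.length : Int) then addA temp' (PySem.List.pyGetD discount e' "")
        else temp'
      solLoopA discount arr temp'' start' e' answer' fuel
    else answer

def solution (want : List String) (number : List Int) (discount : List String) : Int :=
  let arr := (PySem.List.pyRange 0 (want.length : Int) 1).foldl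
      (fun d i => d.insert (PySem.List.pyGetD want i "") (PySem.List.pyGetD number i 0))
      PySem.Dict.empty
  let temp := (PySem.List.pyRange 0 10 1).foldl
      (fun d i => addA d (PySem.List.pyGetD discount i "")) PySem.Dict.empty
  solLoopA discount arr temp (-1) 9 0 discount.length

-- ===== PORT B =====
-- 'cnt[item] = cnt.get(item, 0) + 1'
def addB (d : PySem.Dict String Int) (x : String) : PySem.Dict String Int :=
  d.insert x (d.getD x 0 + 1)

-- the 'while True' do-while loop over window starts; fuel bounds the iterations
def solBLoop (discount : List String) (arr : PySem.Dict String Int)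
    (i answer : Int) : Nat → Int
  | 0 => answer
  | fuel + 1 =>
    let cnt := (PySem.List.pyRange i (i + 10) 1).foldl
      (fun d j => addB d (PySem.List.pyGetD discount j "")) PySem.Dict.empty
    let answer' := if dictEqPy arr cnt then answer + 1 else answer
    let i' := i + 1
    if i' + 10 > (discount.length : Int) then answer'
    else solBLoop discount arr i' answer' fuel

def solution_alt (want : List String) (number : List Int) (discount : List String) : Int :=
  let arr := (want.zip number).foldl (fun d kv => d.insert kv.1 kv.2) PySem.Dict.empty
  solBLoop discount arr 0 0 discount.length

-- ===== PRECONDITION & SPEC =====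
-- A raises IndexError when len(number) < len(want) or len(discount) < 10; exactly those inputs are excluded.
def Pre_solution (want : List String) (number : List Int) (discount : List String) : Prop :=
  want.length ≤ number.length ∧ 10 ≤ discount.length
instance (want : List String) (number : List Int) (discount : List String) : Decidable (Pre_solution want number discount) := by unfold Pre_solution; infer_instance

def pvWitness_solution : List String × List Int × List String :=
  (["a"], [10], ["a","a","a","a","a","a","a","a","a","a"])

def Spec_solution (want : List String) (number : List Int) (discount : List String) (out : Int) : Prop := out = solution_alt want number discount
instance (want : List String) (number : List Int) (discount : List String) (out : Int) : Decidable (Spec_solution want number discount out) := by unfold Spec_solution; infer_instance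

-- ===== CLAIM (what is proved, stated in full; the proofs are below) =====
def Claim_equal_solution : Prop := ∀ (want : List String) (number : List Int) (discount : List String), Dom_solution want number discount → Pre_solution want number discount → Spec_solution want number discount (solution want number discount)


-- ===== LEMMAS AND PROOFS =====

-- temp is mapping-equal to the multiset of the window w
def CntRel (d : PySem.Dict String Int) (w : List String) : Prop :=
  d.keys.Nodup ∧ ∀ k, d.get? k = if w.count k = 0 then none else some (w.count k : Int)

-- B's verdict for the window starting at j
def winGood (arr : PySem.Dict String Int) (discount : List String) (j : Nat) : Bool :=
  dictEqPy arr (PySem.Dict.counter ((discount.drop j).take 10))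

lemma get?_erase_self (d : PySem.Dict String Int) (k : String) :
    (d.erase k).get? k = none := by
  simp [PySem.Dict.erase, PySem.Dict.get?, List.find?_eq_none]

lemma find?_filter_imp {α : Type} (l : List (α × Int)) (p q : α × Int → Bool)
    (h : ∀ x, p x → q x) : (l.filter q).find? p = l.find? p := by
  induction l with
  | nil => rfl
  | cons a t ih =>
    by_cases hp : p a
    · simp [List.find?_cons, hp, h a hp]
    · by_cases hq : q a <;> simp [List.find?_cons, hp, hq, ih]

lemma get?_erase_of_ne (d : PySem.Dict String Int) {k' k : String} (h : k' ≠ k) :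
    (d.erase k).get? k' = d.get? k' := by
  unfold PySem.Dict.erase PySem.Dict.get?
  rw [find?_filter_imp]
  intro x hx
  simp_all

lemma nodup_keys_erase (d : PySem.Dict String Int) (k : String) (h : d.keys.Nodup) :
    (d.erase k).keys.Nodup := by
  unfold PySem.Dict.erase PySem.Dict.keys at *
  exact h.sublist (List.Sublist.map _ List.filter_sublist)

lemma dictEqPy_congr (a b1 b2 : PySem.Dict String Int)
    (h1 : b1.keys.Nodup) (h2 : b2.keys.Nodup) (hg : ∀ k, b1.get? k = b2.get? k) :
    dictEqPy a b1 = dictEqPy a b2 := by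
  have hmem : ∀ k, k ∈ b1.keys ↔ k ∈ b2.keys := by
    intro k
    rw [← not_iff_not, ← PySem.Dict.get?_eq_none_iff_not_mem_keys,
        ← PySem.Dict.get?_eq_none_iff_not_mem_keys, hg k]
  have hperm : b1.keys.Perm b2.keys := (List.perm_ext_iff_of_nodup h1 h2).2 hmem
  have hsize : b1.size = b2.size := by
    have := hperm.length_eq
    simpa [PySem.Dict.keys, PySem.Dict.size] using this
  simp [dictEqPy, hsize, hg]

lemma cntRel_counter (w : List String) : CntRel (PySem.Dict.counter w) w := by
  refine ⟨PySem.Dict.nodup_keys_counter w, fun k => ?_⟩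
  have hc := PySem.Dict.contains_counter w k
  have hs := PySem.Dict.contains_eq_isSome_get? (PySem.Dict.counter w) k
  have hd := PySem.Dict.getD_counter w k
  by_cases hm : k ∈ w
  · have hcnt : w.count k ≠ 0 := Nat.pos_iff_ne_zero.1 (List.count_pos_iff.2 hm)
    have : (PySem.Dict.counter w).contains k = true := by simp [hc, hm]
    rw [this] at hs
    cases hx : (PySem.Dict.counter w).get? k with
    | none => rw [hx] at hs; simp at hs
    | some x =>
      rw [PySem.Dict.getD_eq_get?_getD, hx] at hd
      simp at hd
      simp [hcnt, hd]
  · have hcnt : w.count k = 0 := by simp [List.count_eq_zero]; exact hm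
    have : (PySem.Dict.counter w).contains k = false := by simp [hc]; exact hm
    rw [this] at hs
    cases hx : (PySem.Dict.counter w).get? k with
    | none => simp [hx, hcnt]
    | some x => rw [hx] at hs; simp at hs

lemma cntRel_addA (d : PySem.Dict String Int) (w : List String) (y : String) (h : CntRel d w) :
    CntRel (addA d y) (w ++ [y]) := by
  obtain ⟨hnd, hget⟩ := h
  have hcount : ∀ k, (w ++ [y]).count k = w.count k + (if k = y then 1 else 0) := by
    intro k; by_cases hk : k = y
    · subst hk; simp [List.count_append, List.count_cons]
    · simp [List.count_append, List.count_cons, hk, Ne.symm hk]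
  cases hy : d.get? y with
  | none =>
    have hc0 : w.count y = 0 := by
      have := hget y; rw [hy] at this; by_contra hne; simp [hne] at this
    have ha : addA d y = d.insert y 1 := by rw [addA, hy]
    rw [ha]
    refine ⟨PySem.Dict.nodup_keys_insert d y 1 hnd, fun k => ?_⟩
    rw [PySem.Dict.get?_insert, hcount k]
    by_cases hk : k = y
    · subst hk; simp [hc0]
    · simp [hk, hget k]
  | some v =>
    have hpos : w.count y ≠ 0 ∧ v = (w.count y : Int) := by
      have := hget y; rw [hy] at this
      by_cases hne : w.count y = 0
      · simp [hne] at this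
      · simp [hne] at this; exact ⟨hne, this⟩
    have ha : addA d y = d.insert y (v + 1) := by rw [addA, hy]
    rw [ha]
    refine ⟨PySem.Dict.nodup_keys_insert d y _ hnd, fun k => ?_⟩
    rw [PySem.Dict.get?_insert, hcount k]
    by_cases hk : k = y
    · subst hk; simp [hpos.2]
    · simp [hk, hget k]

lemma cntRel_popA (d : PySem.Dict String Int) (x : String) (w : List String) (h : CntRel d (x :: w)) :
    CntRel (popA d x) w := by
  obtain ⟨hnd, hget⟩ := h
  have hcx : (x :: w).count x = w.count x + 1 := by simp [List.count_cons]
  have hx : d.get? x = some ((w.count x : Int) + 1) := by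
    have := hget x; rw [hcx] at this; simpa using this
  have hck : ∀ k, k ≠ x → (x :: w).count k = w.count k := by
    intro k hk; simp [List.count_cons, hk, Ne.symm hk]
  have hv : (w.count x : Int) + 1 - 1 = (w.count x : Int) := by ring
  by_cases h0 : w.count x = 0
  · have ha : popA d x = (d.insert x ((w.count x : Int) + 1 - 1)).erase x := by
      rw [popA, hx]; simp [hv, h0]
    rw [ha]
    refine ⟨nodup_keys_erase _ _ (PySem.Dict.nodup_keys_insert d x _ hnd), fun k => ?_⟩
    by_cases hk : k = x
    · subst hk; rw [get?_erase_self]; simp [h0]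
    · rw [get?_erase_of_ne _ hk, PySem.Dict.get?_insert, if_neg hk, hget k, hck k hk]
  · have ha : popA d x = d.insert x ((w.count x : Int) + 1 - 1) := by
      rw [popA, hx]; simp [hv, h0]
    rw [ha]
    refine ⟨PySem.Dict.nodup_keys_insert d x _ hnd, fun k => ?_⟩
    rw [PySem.Dict.get?_insert]
    by_cases hk : k = x
    · subst hk; simp [h0, hv]
    · rw [if_neg hk, hget k, hck k hk]

lemma cntRel_foldl_addA (l : List String) : ∀ (d : PySem.Dict String Int) (w : List String),
    CntRel d w → CntRel (l.foldl addA d) (w ++ l) := by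
  induction l with
  | nil => intro d w h; simpa using h
  | cons a t ih =>
    intro d w h
    have := ih (addA d a) (w ++ [a]) (cntRel_addA d w a h)
    simpa using this

lemma cntRel_dictEq (arr d : PySem.Dict String Int) (w : List String) (h : CntRel d w) :
    dictEqPy arr d = dictEqPy arr (PySem.Dict.counter w) := by
  exact dictEqPy_congr arr d (PySem.Dict.counter w) h.1 (cntRel_counter w).1
    (fun k => by rw [h.2 k, (cntRel_counter w).2 k])

lemma idx_fold_addA (xs : List String) : ∀ (m : Nat), m ≤ xs.length → ∀ d,
    (List.range m).foldl (fun d k => addA d (xs.getD k "")) d = (xs.take m).foldl addA d := by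
  intro m
  induction m with
  | zero => intro _ d; simp
  | succ n ih =>
    intro hm d
    have hn : n < xs.length := by omega
    have ht : xs.take (n+1) = xs.take n ++ [xs[n]] := by
      rw [List.take_succ, List.getElem?_eq_getElem hn]; simp
    rw [List.range_succ, List.foldl_append, ih (by omega) d, ht, List.foldl_append]
    simp [List.getElem?_eq_getElem hn]

lemma zip_fold_insert (xs : List String) : ∀ (ys : List Int) (d : PySem.Dict String Int),
    xs.length ≤ ys.length →
    (List.range xs.length).foldl (fun d i => d.insert (xs.getD i "") (ys.getD i 0)) d
      = (xs.zip ys).foldl (fun d kv => d.insert kv.1 kv.2) d := by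
  induction xs with
  | nil => intro ys d _; simp
  | cons x xs ih =>
    intro ys d hlen
    cases ys with
    | nil => simp at hlen
    | cons y ys =>
      rw [List.length_cons, List.range_succ_eq_map, List.foldl_cons, List.foldl_map]
      simp only [List.getD_cons_zero, List.getD_cons_succ]
      rw [ih ys (d.insert x y) (by simpa using hlen)]
      simp

lemma loopA_spec (discount : List String) (arr : PySem.Dict String Int) :
    ∀ (fuel j : Nat) (temp : PySem.Dict String Int) (answer : Int),
    discount.length ≤ j + 9 + fuel →
    (j + 9 < discount.length → CntRel temp ((discount.drop j).take 10)) →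
    solLoopA discount arr temp ((j : Int) - 1) ((j : Int) + 9) answer fuel
      = answer + ((List.range' j (discount.length - 9 - j)).countP (winGood arr discount) : Int) := by
  intro fuel
  induction fuel with
  | zero =>
    intro j temp answer hle _
    have h0 : discount.length - 9 - j = 0 := by omega
    simp [solLoopA, h0]
  | succ fuel ih =>
    intro j temp answer hle hrel
    rw [solLoopA]
    by_cases hj : (j : Int) + 9 < (discount.length : Int)
    · rw [if_pos hj]
      simp only []
      have hjn : j + 9 < discount.length := by exact_mod_cast hj
      have hrel' := hrel hjn
      have hjlt : j < discount.length := by omega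
      have hwin : (discount.drop j).take 10 = discount[j] :: ((discount.drop (j+1)).take 9) := by
        rw [List.drop_eq_getElem_cons hjlt, List.take_succ_cons]
      have hcmp : dictEqPy arr temp = winGood arr discount j := cntRel_dictEq arr temp _ hrel'
      have hds : PySem.List.pyGetD discount ((j : Int) - 1 + 1) "" = discount[j] := by
        rw [show ((j : Int) - 1 + 1) = ((j : Nat) : Int) by ring, PySem.List.pyGetD_natCast,
            List.getD_eq_getElem discount "" hjlt]
      have hde : PySem.List.pyGetD discount ((j : Int) + 9 + 1) "" = discount.getD (j + 10) "" := by
        rw [show ((j : Int) + 9 + 1) = (((j + 10 : Nat)) : Int) by push_cast; ring,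
            PySem.List.pyGetD_natCast]
      have hpop : CntRel (popA temp discount[j]) ((discount.drop (j+1)).take 9) :=
        cntRel_popA temp discount[j] _ (hwin ▸ hrel')
      have e1 : ((j : Int) - 1 + 1) = (((j + 1 : Nat)) : Int) - 1 := by push_cast; ring
      have e2 : ((j : Int) + 9 + 1) = (((j + 1 : Nat)) : Int) + 9 := by push_cast; ring
      rw [hds, hde]
      simp only [e1, e2]
      have hsplit : discount.length - 9 - j = (discount.length - 9 - (j + 1)) + 1 := by omega
      rw [hsplit, List.range'_succ, List.countP_cons]
      by_cases hj10 : j + 10 < discount.length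
      · rw [if_pos (by push_cast; omega : (((j + 1 : Nat)) : Int) + 9 < (discount.length : Int))]
        have hwin2 : (discount.drop (j+1)).take 10
            = ((discount.drop (j+1)).take 9) ++ [discount.getD (j + 10) ""] := by
          rw [List.take_succ, List.getElem?_drop,
              List.getElem?_eq_getElem (by omega : j + 1 + 9 < discount.length),
              List.getD_eq_getElem discount "" (by omega : j + 10 < discount.length)]
          simp [show j + 1 + 9 = j + 10 by omega]
        have hnext : CntRel (addA (popA temp discount[j]) (discount.getD (j + 10) ""))
            ((discount.drop (j+1)).take 10) := by
          rw [hwin2]; exact cntRel_addA _ _ _ hpop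
        rw [ih (j+1) _ _ (by omega) (fun _ => hnext)]
        rw [hcmp]
        cases hwg : winGood arr discount j <;> simp [hwg] <;> push_cast <;> ring
      · rw [if_neg (by push_cast; omega : ¬ ((((j + 1 : Nat)) : Int) + 9 < (discount.length : Int)))]
        rw [ih (j+1) _ _ (by omega) (fun hc => absurd hc (by omega))]
        rw [hcmp]
        cases hwg : winGood arr discount j <;> simp [hwg] <;> push_cast <;> ring
    · rw [if_neg hj]
      have h0 : discount.length - 9 - j = 0 := by
        have : ¬ (j + 9 < discount.length) := by exact_mod_cast hj
        omega
      simp [h0]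

lemma idx_fold_addB (xs : List String) (j : Nat) : ∀ (m : Nat), j + m ≤ xs.length → ∀ d,
    (List.range m).foldl (fun d k => addB d (xs.getD (j + k) "")) d
      = ((xs.drop j).take m).foldl addB d := by
  intro m
  induction m with
  | zero => intro _ d; simp
  | succ n ih =>
    intro hm d
    have hn : j + n < xs.length := by omega
    have ht : (xs.drop j).take (n+1) = (xs.drop j).take n ++ [xs[j + n]] := by
      rw [List.take_succ, List.getElem?_drop, List.getElem?_eq_getElem hn]; simp
    rw [List.range_succ, List.foldl_append, ih (by omega) d, ht, List.foldl_append]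
    simp [List.getD_eq_getElem?_getD, List.getElem?_eq_getElem hn]

lemma cnt_window (discount : List String) (j : Nat) (h : j + 10 ≤ discount.length) :
    (PySem.List.pyRange (j : Int) ((j : Int) + 10) 1).foldl
      (fun d i => addB d (PySem.List.pyGetD discount i "")) PySem.Dict.empty
      = PySem.Dict.counter ((discount.drop j).take 10) := by
  rw [PySem.List.pyRange_one]
  have h1 : (((j : Int) + 10 - (j : Int))).toNat = 10 := by omega
  rw [h1, List.foldl_map]
  have hb : ∀ (d : PySem.Dict String Int) (k : Nat),
      addB d (PySem.List.pyGetD discount ((j : Int) + (k : Int)) "")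
        = addB d (discount.getD (j + k) "") := by
    intro d k
    rw [show ((j : Int) + (k : Int)) = (((j + k : Nat)) : Int) by push_cast; ring,
        PySem.List.pyGetD_natCast]
  simp only [hb]
  rw [idx_fold_addB discount j 10 h PySem.Dict.empty,
      show addB = fun (d : PySem.Dict String Int) x => d.insert x (d.getD x 0 + 1) from rfl,
      PySem.Dict.foldl_insert_getD_add_one_eq_counter]

lemma loopB_spec (discount : List String) (arr : PySem.Dict String Int) :
    ∀ (fuel j : Nat) (answer : Int),
    j + 10 ≤ discount.length → discount.length - 9 - j ≤ fuel →
    solBLoop discount arr (j : Int) answer fuel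
      = answer + ((List.range' j (discount.length - 9 - j)).countP (winGood arr discount) : Int) := by
  intro fuel
  induction fuel with
  | zero => intro j answer hj hf; omega
  | succ fuel ih =>
    intro j answer hj hf
    rw [solBLoop]
    rw [cnt_window discount j hj]
    have hsplit : discount.length - 9 - j = (discount.length - 9 - (j + 1)) + 1 := by omega
    rw [hsplit, List.range'_succ, List.countP_cons]
    by_cases hend : j + 1 + 10 > discount.length
    · rw [if_pos (by push_cast; omega : (j : Int) + 1 + 10 > (discount.length : Int))]
      have h0 : discount.length - 9 - (j + 1) = 0 := by omega
      rw [h0]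
      cases hwg : winGood arr discount j <;> simp only [winGood] at hwg <;> simp [hwg, winGood]
    · rw [if_neg (by push_cast; omega : ¬ ((j : Int) + 1 + 10 > (discount.length : Int)))]
      rw [show ((j : Int) + 1) = (((j + 1 : Nat)) : Int) by push_cast; ring]
      rw [ih (j + 1) _ (by omega) (by omega)]
      cases hwg : winGood arr discount j <;> simp only [winGood] at hwg <;>
        simp [hwg, winGood] <;> push_cast <;> ring

-- ===== VERDICT (by name: the statement is the Claim_ definition above) =====
theorem solution_spec : Claim_equal_solution := by
  intro want number discount hdom hpre
  obtain ⟨hwn, h10⟩ := hpre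
  unfold Spec_solution
  simp only [solution]
  -- the target dict: A's index loop equals B's zip fold
  rw [PySem.List.pyRange_zero_nat, List.foldl_map]
  simp only [PySem.List.pyGetD_natCast]
  rw [zip_fold_insert want number PySem.Dict.empty hwn]
  -- the prefix window dict
  rw [show ((10 : Int)) = (((10 : Nat)) : Int) by norm_num, PySem.List.pyRange_zero_nat,
      List.foldl_map]
  simp only [PySem.List.pyGetD_natCast]
  rw [idx_fold_addA discount 10 h10 PySem.Dict.empty]
  have hrel0 : CntRel PySem.Dict.empty [] := by
    refine ⟨?_, fun k => ?_⟩
    · simp [PySem.Dict.keys, PySem.Dict.empty]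
    · simp [PySem.Dict.get?, PySem.Dict.empty]
  have hrel : CntRel ((discount.take 10).foldl addA PySem.Dict.empty) ((discount.drop 0).take 10) := by
    have := cntRel_foldl_addA (discount.take 10) PySem.Dict.empty [] hrel0
    simpa using this
  rw [show (-1 : Int) = ((0 : Nat) : Int) - 1 by norm_num,
      show (9 : Int) = ((0 : Nat) : Int) + 9 by norm_num]
  rw [loopA_spec discount _ discount.length 0 _ 0 (by omega) (fun _ => hrel)]
  simp only [solution_alt]
  have hb := loopB_spec discount
    ((want.zip number).foldl (fun d kv => d.insert kv.1 kv.2) PySem.Dict.empty)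
    discount.length 0 0 (by omega) (by omega)
  push_cast at hb
  rw [hb]
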